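-- pv_equiv track=rewrite | github.com/chorokKim/baekjoon | 프로그래머스/0/120853. 컨트롤 제트/컨트롤 제트.py | solution
-- ===== SOURCE A (Python) =====
-- def solution(s):
--     stack = []
--     for i in s.split():
--         if i == "Z":
--             stack.pop()
--             continue
--         stack.append(int(i))
--     return sum(stack)
-- ===== SOURCE B (Python) =====
-- def solution(s):
--     total = 0
--     skip = 0
--     for t in reversed(s.split()):
--         if t == "Z":
--             skip += 1
--         elif skip:
--             skip -= 1
--         else:
--             total += int(t)
--     return total
-- ===== Notes on version B (the rewrite author's own statement) =====
-- stated objective: alternative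
-- what changed: Replaces the stack (append/pop then sum) by a single reverse pass keeping only a running total and an integer skip counter, O(1) extra space.
-- outside the precondition, e.g. on solution('Z'): A raises IndexError, B returns 0
import Mathlib
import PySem

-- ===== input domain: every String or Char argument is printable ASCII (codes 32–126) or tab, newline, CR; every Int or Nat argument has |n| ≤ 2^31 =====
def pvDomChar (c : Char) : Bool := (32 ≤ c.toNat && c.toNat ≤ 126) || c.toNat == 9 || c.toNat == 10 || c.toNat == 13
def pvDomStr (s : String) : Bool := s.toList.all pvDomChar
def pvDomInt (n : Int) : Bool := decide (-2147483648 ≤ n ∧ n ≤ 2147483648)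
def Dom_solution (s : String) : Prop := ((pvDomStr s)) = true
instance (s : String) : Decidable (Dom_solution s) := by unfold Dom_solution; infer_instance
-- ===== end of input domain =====

-- B replaces A's stack (append/pop, then sum) by one reverse pass with a running
-- total and a skip counter (alternative decomposition, O(1) extra space).
-- Pre_ excludes exactly the inputs where A raises (IndexError on pop from an
-- empty stack, ValueError on a token that is neither "Z" nor an int literal).

-- ===== PORT A =====
def aStep (acc : Option (List Int)) (t : String) : Option (List Int) :=
  match acc with
  | none => none
  | some stack =>
    if t = "Z" then
      match PySem.List.pop? stack with   -- stack.pop(): none = IndexError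
      | none => none
      | some (_, rest) => some rest
    else
      match PySem.Int.ofStr? t with      -- int(t): none = ValueError
      | none => none
      | some n => some (stack ++ [n])

def solution (s : String) : Int :=
  match (PySem.Str.split₀ s).foldl aStep (some []) with
  | none => 0                            -- unreachable under Pre_solution
  | some stack => stack.sum

-- ===== PORT B =====
def bStep (acc : Int × Nat) (t : String) : Int × Nat :=
  if t = "Z" then (acc.1, acc.2 + 1)
  else if acc.2 > 0 then (acc.1, acc.2 - 1)
  else (acc.1 + (PySem.Int.ofStr? t).getD 0, acc.2)   -- int(t); default unreachable under Pre_

def solution_alt (s : String) : Int :=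
  ((PySem.Str.split₀ s).reverse.foldl bStep (0, 0)).1

-- ===== PRECONDITION & SPEC =====
-- Exactly the inputs on which A returns: every token is "Z" or an int literal,
-- and no prefix of the token list has more "Z"s than numbers (else pop raises).
def Pre_solution (s : String) : Prop :=
  (∀ t ∈ PySem.Str.split₀ s, t ≠ "Z" → (PySem.Int.ofStr? t).isSome = true) ∧
  (∀ k ∈ List.range ((PySem.Str.split₀ s).length + 1),
      2 * ((PySem.Str.split₀ s).take k).count "Z" ≤ k)
instance (s : String) : Decidable (Pre_solution s) := by unfold Pre_solution; infer_instance

def pvWitness_solution : String := "1 2 Z 3"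

def Spec_solution (s : String) (out : Int) : Prop := out = solution_alt s
instance (s : String) (out : Int) : Decidable (Spec_solution s out) := by unfold Spec_solution; infer_instance

-- ===== CLAIM (what is proved, stated in full; the proofs are below) =====
def Claim_equal_solution : Prop := ∀ (s : String), Dom_solution s → Pre_solution s → Spec_solution s (solution s)

-- ===== LEMMAS AND PROOFS =====

-- B's loop over a token list (B folds over the reversed list).
def gB (toks : List String) : Int × Nat := toks.reverse.foldl bStep (0, 0)

lemma gB_cons (t : String) (r : List String) : gB (t :: r) = bStep (gB r) t := by
  simp [gB, List.foldl_append]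

lemma bStep_Z (acc : Int × Nat) : bStep acc "Z" = (acc.1, acc.2 + 1) := by
  simp [bStep]

lemma bStep_num (acc : Int × Nat) (t : String) (ht : t ≠ "Z") :
    bStep acc t =
      if acc.2 > 0 then (acc.1, acc.2 - 1)
      else (acc.1 + (PySem.Int.ofStr? t).getD 0, acc.2) := by
  simp [bStep, ht]

-- The leftover skip counter, computed from the left.
def pendingZ : List String → Nat
  | [] => 0
  | t :: r => if t = "Z" then pendingZ r + 1 else pendingZ r - 1

lemma gB_snd_eq_pendingZ (toks : List String) : (gB toks).2 = pendingZ toks := by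
  induction toks with
  | nil => rfl
  | cons t r ih =>
    rw [gB_cons, pendingZ]
    by_cases ht : t = "Z"
    · rw [ht, bStep_Z]; simp [ih]
    · rw [bStep_num _ _ ht]
      by_cases hp : (gB r).2 > 0
      · simp [hp, ht, ← ih]
      · simp [hp, ht, ← ih]; omega

-- Prefix balance bounds the leftover skip counter.
lemma pendingZ_le (toks : List String) (m : Nat)
    (h : ∀ k, 2 * ((toks.take k).count "Z") ≤ min k toks.length + m) :
    pendingZ toks ≤ m := by
  induction toks generalizing m with
  | nil => simp [pendingZ]
  | cons t r ih =>
    rw [pendingZ]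
    by_cases ht : t = "Z"
    · subst ht
      have hm : 1 ≤ m := by
        have := h 1
        simp only [List.take_succ_cons, List.take_zero, List.count_cons,
          List.count_nil] at this
        simp at this
        omega
      have hr : pendingZ r ≤ m - 1 := by
        apply ih
        intro k
        have := h (k + 1)
        simp only [List.take_succ_cons, List.count_cons] at this
        simp at this
        omega
      simp; omega
    · have hr : pendingZ r ≤ m + 1 := by
        apply ih
        intro k
        have := h (k + 1)
        have hne : (t == "Z") = false := beq_eq_false_iff_ne.mpr ht
        simp only [List.take_succ_cons, List.count_cons, List.length_cons] at this
        rw [hne] at this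
        simp at this
        omega
      simp [ht]; omega

-- Main correspondence: A's fold from stack st succeeds and its sum is the sum of
-- the part of st that B's skip counter would not have popped, plus B's total.
lemma fold_eq (toks : List String) :
    ∀ st : List Int,
      (∀ t ∈ toks, t ≠ "Z" → (PySem.Int.ofStr? t).isSome = true) →
      (gB toks).2 ≤ st.length →
      ∃ st', toks.foldl aStep (some st) = some st' ∧
        st'.sum = (st.take (st.length - (gB toks).2)).sum + (gB toks).1 := by
  induction toks with
  | nil =>
    intro st _ _
    exact ⟨st, rfl, by simp [gB]⟩
  | cons t r ih =>
    intro st hval hskip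
    rw [gB_cons] at hskip ⊢
    have hvr : ∀ u ∈ r, u ≠ "Z" → (PySem.Int.ofStr? u).isSome = true :=
      fun u hu => hval u (List.mem_cons_of_mem _ hu)
    by_cases ht : t = "Z"
    · subst ht
      rw [bStep_Z] at hskip ⊢
      rcases List.eq_nil_or_concat st with rfl | ⟨ys, y, rfl⟩
      · simp at hskip
      · rw [List.concat_eq_append] at *
        have hpop : PySem.List.pop? (ys ++ [y]) = some (y, ys) :=
          PySem.List.pop?_last _ _
        have hlen : (ys ++ [y]).length = ys.length + 1 := by simp
        obtain ⟨st', h1, h2⟩ := ih ys hvr (by rw [hlen] at hskip; omega)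
        refine ⟨st', ?_, ?_⟩
        · simpa [List.foldl_cons, aStep, hpop] using h1
        · rw [h2, hlen]
          have hle : ys.length - (gB r).2 ≤ ys.length := Nat.sub_le _ _
          rw [show ys.length + 1 - ((gB r).2 + 1) = ys.length - (gB r).2 by omega,
            List.take_append_of_le_length hle]
    · obtain ⟨n, hn⟩ := Option.isSome_iff_exists.mp (hval t List.mem_cons_self ht)
      have hstep : aStep (some st) t = some (st ++ [n]) := by
        simp [aStep, ht, hn]
      rw [bStep_num _ _ ht] at hskip ⊢
      obtain ⟨st', h1, h2⟩ := ih (st ++ [n]) hvr (by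
        by_cases hp : (gB r).2 > 0 <;> simp [hp] at hskip ⊢ <;> omega)
      refine ⟨st', ?_, ?_⟩
      · simpa [List.foldl_cons, hstep] using h1
      · rw [h2]
        by_cases hp : (gB r).2 > 0
        · rw [if_pos hp] at hskip ⊢
          have hp' : 1 ≤ (gB r).2 := hp
          have hle : st.length + 1 - (gB r).2 ≤ st.length :=
            Nat.le_of_lt_succ (Nat.sub_lt (Nat.succ_pos _) hp')
          have harith : ∀ L K : Nat, 1 ≤ K → L + 1 - K = L - (K - 1) := by
            intro L K hK; omega
          rw [List.length_append, List.length_singleton,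
            List.take_append_of_le_length hle, harith st.length _ hp']
        · have hp0 : (gB r).2 = 0 := by omega
          rw [if_neg hp, hp0, hn]
          simp
          ring

-- ===== VERDICT (by name: the statement is the Claim_ definition above) =====
theorem solution_spec : Claim_equal_solution := by
  intro s _ hpre
  obtain ⟨hval, hbal⟩ := hpre
  unfold Spec_solution
  set toks := PySem.Str.split₀ s with htoks
  have hskip0 : (gB toks).2 = 0 := by
    rw [gB_snd_eq_pendingZ]
    have := pendingZ_le toks 0 (by
      intro k
      by_cases hk : k ≤ toks.length
      · have h1 := hbal k (by simp [List.mem_range]; omega)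
        omega
      · have h1 := hbal toks.length (by simp [List.mem_range])
        have h2 : toks.take k = toks := List.take_of_length_le (by omega)
        have h3 : toks.take toks.length = toks := List.take_of_length_le le_rfl
        rw [h3] at h1
        rw [h2]
        omega)
    omega
  obtain ⟨st', h1, h2⟩ := fold_eq toks [] hval (by rw [hskip0]; simp)
  rw [hskip0] at h2
  simp only [List.take_nil, List.sum_nil, zero_add] at h2
  unfold solution solution_alt
  rw [← htoks, h1]
  exact h2
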